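-- pv_equiv track=rewrite | github.com/Kimchanghee/NewshoppingShorts | scripts/replace_bare_excepts.py | find_bare_excepts
-- ===== SOURCE A (Python) =====
-- from typing import List, Tuple, Optional
--
-- def find_bare_excepts(content: str) -> List[Tuple[int, str, str]]:
--     """
--     Find all bare except: blocks in content.
--
--     Returns:
--         List of (line_number, except_line, try_block_content)
--     """
--     lines = content.split('\n')
--     bare_excepts = []
--     current_try_block = []
--     in_try_block = False
--     try_start_line = -1
--
--     for i, line in enumerate(lines):
--         stripped = line.strip()
--
--         # Detect try: block
--         if stripped.startswith('try:'):
--             in_try_block = True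
--             try_start_line = i
--             current_try_block = []
--             continue
--
--         # Collect try block content
--         if in_try_block:
--             if stripped.startswith('except:') or stripped == 'except:':
--                 # Found bare except
--                 try_content = '\n'.join(current_try_block)
--                 bare_excepts.append((i, line, try_content))
--                 in_try_block = False
--             elif stripped.startswith('except ') or stripped.startswith('finally:') or stripped.startswith('else:'):
--                 # End of try block
--                 in_try_block = False
--             else:
--                 current_try_block.append(line)
--
--     return bare_excepts
-- ===== SOURCE B (Python) =====
-- def find_bare_excepts(content):
--     """Index-first decomposition: collect try-line indices once, then scan
--     forward from each try independently for its bare except."""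
--     lines = content.split('\n')
--     try_idxs = [i for i, line in enumerate(lines) if line.strip().startswith('try:')]
--     results = []
--     for t in try_idxs:
--         block = []
--         for j in range(t + 1, len(lines)):
--             s = lines[j].strip()
--             if s.startswith('try:'):
--                 break  # a new try takes over; this one yields nothing
--             if s.startswith('except:'):
--                 results.append((j, lines[j], '\n'.join(block)))
--                 break
--             if s.startswith('except ') or s.startswith('finally:') or s.startswith('else:'):
--                 break
--             block.append(lines[j])
--     return results
-- ===== Notes on version B (the rewrite author's own statement) =====
-- stated objective: alternative
-- what changed: A's single flat state machine (in_try_block flag, running block accumulator) is replaced by an index-first decomposition: one pass collects the indices of 'try:' lines, then an independent inner forward scan from each try finds its bare except or aborts at a terminator/nested try.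
import Mathlib
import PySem

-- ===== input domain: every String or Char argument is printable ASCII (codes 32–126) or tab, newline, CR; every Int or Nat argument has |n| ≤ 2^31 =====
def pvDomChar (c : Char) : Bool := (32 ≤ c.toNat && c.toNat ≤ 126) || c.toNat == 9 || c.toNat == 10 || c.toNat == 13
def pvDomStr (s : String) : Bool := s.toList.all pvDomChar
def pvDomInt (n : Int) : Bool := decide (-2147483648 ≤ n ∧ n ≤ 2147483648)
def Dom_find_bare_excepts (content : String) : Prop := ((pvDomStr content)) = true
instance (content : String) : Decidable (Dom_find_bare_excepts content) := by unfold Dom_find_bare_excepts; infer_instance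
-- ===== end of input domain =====

-- B collects the try-line indices first, then scans forward from each try independently (alternative decomposition of A's flat state machine); proved equal on all inputs.


-- ===== PORT A =====
-- A's for-loop over enumerate(lines) with state (bare_excepts, current_try_block, in_try_block);
-- the dead variable try_start_line (assigned, never read) is dropped.
def goA (ls : List String) (i : Int) (acc : List (Int × String × String))
    (cur : List String) (inTry : Bool) : List (Int × String × String) :=
  match ls with
  | [] => acc
  | l :: rest =>
    let stripped := PySem.Str.strip l
    if PySem.Str.startswith stripped "try:" then
      goA rest (i + 1) acc [] true
    else if inTry then
      if PySem.Str.startswith stripped "except:" || stripped == "except:" then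
        goA rest (i + 1) (acc ++ [(i, l, PySem.Str.join "\n" cur)]) cur false
      else if PySem.Str.startswith stripped "except " || PySem.Str.startswith stripped "finally:"
          || PySem.Str.startswith stripped "else:" then
        goA rest (i + 1) acc cur false
      else
        goA rest (i + 1) acc (cur ++ [l]) inTry
    else
      goA rest (i + 1) acc cur false

def find_bare_excepts (content : String) : List (Int × String × String) :=
  goA ((PySem.Str.split? content "\n").getD []) 0 [] [] false

-- ===== PORT B =====
-- inner loop of B: scan the lines after a try, accumulating the block
def scanB (ls : List String) (j : Int) (block : List String) : Option (Int × String × String) :=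
  match ls with
  | [] => none
  | l :: rest =>
    let s := PySem.Str.strip l
    if PySem.Str.startswith s "try:" then none
    else if PySem.Str.startswith s "except:" then some (j, l, PySem.Str.join "\n" block)
    else if PySem.Str.startswith s "except " || PySem.Str.startswith s "finally:"
        || PySem.Str.startswith s "else:" then none
    else scanB rest (j + 1) (block ++ [l])

def find_bare_excepts_alt (content : String) : List (Int × String × String) :=
  let lines := (PySem.Str.split? content "\n").getD []
  let tryIdxs := (PySem.List.enumerate lines 0).filter
    (fun p => PySem.Str.startswith (PySem.Str.strip p.2) "try:")
  tryIdxs.filterMap (fun p => scanB (lines.drop (p.1.toNat + 1)) (p.1 + 1) [])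

-- ===== PRECONDITION & SPEC =====
def Spec_find_bare_excepts (content : String) (out : List (Int × String × String)) : Prop := out = find_bare_excepts_alt content
instance (content : String) (out : List (Int × String × String)) : Decidable (Spec_find_bare_excepts content out) := by unfold Spec_find_bare_excepts; infer_instance

-- ===== CLAIM (what is proved, stated in full; the proofs are below) =====
def Claim_equal_find_bare_excepts : Prop := ∀ (content : String), Dom_find_bare_excepts content → Spec_find_bare_excepts content (find_bare_excepts content)

-- ===== LEMMAS AND PROOFS =====

-- pure characterization of the result starting "not inside a try" at position i
def bAll (ls : List String) (i : Int) : List (Int × String × String) :=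
  match ls with
  | [] => []
  | l :: rest =>
    (if PySem.Str.startswith (PySem.Str.strip l) "try:" then
        (scanB rest (i + 1) []).toList else []) ++ bAll rest (i + 1)

lemma goA_eq_bAll (ls : List String) : ∀ (i : Int) (acc : List (Int × String × String))
    (cur : List String),
    goA ls i acc cur false = acc ++ bAll ls i ∧
    goA ls i acc cur true = acc ++ (scanB ls i cur).toList ++ bAll ls i := by
  induction ls with
  | nil => intro i acc cur; simp [goA, bAll, scanB]
  | cons l rest ih =>
    intro i acc cur
    by_cases htry : PySem.Str.startswith (PySem.Str.strip l) "try:"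
    · refine ⟨?_, ?_⟩ <;>
      · simp only [goA, htry, if_pos, bAll, scanB]
        rw [(ih (i+1) acc []).2]; simp
    · by_cases hexc : (PySem.Str.startswith (PySem.Str.strip l) "except:" || (PySem.Str.strip l == "except:")) = true
      · have hexc2 : PySem.Str.startswith (PySem.Str.strip l) "except:" = true := by
          rcases Bool.or_eq_true_iff.mp hexc with h | h
          · exact h
          · have h2 : PySem.Str.strip l = "except:" := by simpa using h
            rw [h2]; decide
        refine ⟨?_, ?_⟩
        · simp only [goA, htry, Bool.false_eq_true, if_false, bAll, hexc2]
          rw [(ih (i+1) acc cur).1]; simp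
        · simp only [goA, htry, Bool.false_eq_true, if_true, bAll, scanB, hexc2]
          rw [(ih (i+1) (acc ++ [(i, l, PySem.Str.join "\n" cur)]) cur).1]; simp
      · have hexcf : (PySem.Str.startswith (PySem.Str.strip l) "except:" || (PySem.Str.strip l == "except:")) = false := by
          simpa using hexc
        have hexc2 : PySem.Str.startswith (PySem.Str.strip l) "except:" = false :=
          (Bool.or_eq_false_iff.mp hexcf).1
        by_cases hterm : (PySem.Str.startswith (PySem.Str.strip l) "except " || PySem.Str.startswith (PySem.Str.strip l) "finally:"
            || PySem.Str.startswith (PySem.Str.strip l) "else:") = true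
        · refine ⟨?_, ?_⟩
          · simp only [goA, htry, Bool.false_eq_true, bAll, hexc2, if_false]
            rw [(ih (i+1) acc cur).1]; simp
          · simp only [goA, htry, hterm, Bool.false_eq_true, if_true, if_false, bAll, scanB, hexc2]
            rw [(ih (i+1) acc cur).1]; simp
            intro h2; rw [h2] at hexc; simp at hexc
        · have htermf : (PySem.Str.startswith (PySem.Str.strip l) "except " || PySem.Str.startswith (PySem.Str.strip l) "finally:"
              || PySem.Str.startswith (PySem.Str.strip l) "else:") = false := by simpa using hterm
          refine ⟨?_, ?_⟩
          · simp only [goA, htry, Bool.false_eq_true, bAll, hexc2, if_false]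
            rw [(ih (i+1) acc cur).1]; simp
          · simp only [goA, htry, htermf, Bool.false_eq_true, if_false, bAll, scanB, hexc2]
            rw [(ih (i+1) acc (cur ++ [l])).2]; simp
            intro h2; rw [h2] at hexc; simp at hexc

lemma alt_eq_bAll (ls : List String) : ∀ (pre : List String),
    ((PySem.List.enumerate ls (pre.length : Int)).filter
        (fun p => PySem.Str.startswith (PySem.Str.strip p.2) "try:")).filterMap
      (fun p => scanB ((pre ++ ls).drop (p.1.toNat + 1)) (p.1 + 1) [])
    = bAll ls (pre.length : Int) := by
  induction ls with
  | nil => intro pre; simp [PySem.List.enumerate_nil, bAll]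
  | cons l rest ih =>
    intro pre
    rw [PySem.List.enumerate_cons]
    have hdrop : (pre ++ l :: rest).drop (pre.length + 1) = rest := by
      have : pre ++ l :: rest = (pre ++ [l]) ++ rest := by simp
      rw [this]
      have : pre.length + 1 = (pre ++ [l]).length := by simp
      rw [this, List.drop_left]
    have hih := ih (pre ++ [l])
    have hlen : ((pre ++ [l]).length : Int) = (pre.length : Int) + 1 := by simp
    rw [hlen] at hih
    have harg : ∀ p : Int × String, p ∈ PySem.List.enumerate rest ((pre.length : Int) + 1) →
        ((pre ++ l :: rest).drop (p.1.toNat + 1)) = ((pre ++ [l]) ++ rest).drop (p.1.toNat + 1) := by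
      intro p _; simp
    by_cases htry : PySem.Str.startswith (PySem.Str.strip l) "try:"
    · rw [List.filter_cons_of_pos (by simpa using htry)]
      rw [List.filterMap_cons]
      simp only [Int.toNat_natCast, hdrop, bAll, htry, if_pos]
      cases hscan : scanB rest ((pre.length : Int) + 1) [] with
      | none =>
        simp only [Option.toList_none, List.nil_append]
        rw [← hih]
        apply List.filterMap_congr
        intro p hp
        rw [List.mem_filter] at hp
        rw [harg p hp.1]
      | some r =>
        simp only [Option.toList_some, List.singleton_append]
        congr 1
        rw [← hih]
        apply List.filterMap_congr
        intro p hp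
        rw [List.mem_filter] at hp
        rw [harg p hp.1]
    · rw [List.filter_cons_of_neg (by simpa using htry)]
      simp only [bAll, htry, Bool.false_eq_true]
      rw [← hih]
      apply List.filterMap_congr
      intro p hp
      rw [List.mem_filter] at hp
      rw [harg p hp.1]

-- ===== VERDICT (by name: the statement is the Claim_ definition above) =====
theorem find_bare_excepts_spec : Claim_equal_find_bare_excepts := by
  intro content _
  unfold Spec_find_bare_excepts find_bare_excepts find_bare_excepts_alt
  have h1 := (goA_eq_bAll ((PySem.Str.split? content "\n").getD []) 0 [] []).1
  have h2 := alt_eq_bAll ((PySem.Str.split? content "\n").getD []) []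
  simp only [List.length_nil, Nat.cast_zero, List.nil_append] at h1 h2
  rw [h1, h2]
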